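-- pv_equiv track=rewrite | github.com/cristhyanearaldi/Trybe-Projects | MODULO4_Ciencia-da-Computacao/Project_37-Restaurant-Orders/src/analyze_log.py | get_maria_restaurant_orders
-- ===== SOURCE A (Python) =====
-- def get_maria_restaurant_orders(data, customer):
--     most_ordered = {}
--
--     for row in data:
--         if row[0] == customer:
--             if row[1] not in most_ordered:
--                 most_ordered[row[1]] = 1
--             else:
--                 most_ordered[row[1]] += 1
--
--     return max(most_ordered, key=most_ordered.get)
-- ===== SOURCE B (Python) =====
-- def get_maria_restaurant_orders(data, customer):
--     dishes = [row[1] for row in data if row[0] == customer]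
--     best_dish, best_count = dishes[0], 0
--     while dishes:
--         dish = dishes[0]
--         rest = [x for x in dishes if x != dish]
--         count = len(dishes) - len(rest)
--         if count > best_count:
--             best_dish, best_count = dish, count
--         dishes = rest
--     return best_dish
-- ===== Notes on version B (the rewrite author's own statement) =====
-- stated objective: alternative
-- what changed: B replaces A's one-pass count-dict plus max(dict, key=get) by successive extraction: it repeatedly removes every copy of the first remaining dish from the flat dish list, comparing that dish's multiplicity (taken as a length difference) against a running best, with a strict comparison reproducing A's insertion-order tie-break.
import Mathlib
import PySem

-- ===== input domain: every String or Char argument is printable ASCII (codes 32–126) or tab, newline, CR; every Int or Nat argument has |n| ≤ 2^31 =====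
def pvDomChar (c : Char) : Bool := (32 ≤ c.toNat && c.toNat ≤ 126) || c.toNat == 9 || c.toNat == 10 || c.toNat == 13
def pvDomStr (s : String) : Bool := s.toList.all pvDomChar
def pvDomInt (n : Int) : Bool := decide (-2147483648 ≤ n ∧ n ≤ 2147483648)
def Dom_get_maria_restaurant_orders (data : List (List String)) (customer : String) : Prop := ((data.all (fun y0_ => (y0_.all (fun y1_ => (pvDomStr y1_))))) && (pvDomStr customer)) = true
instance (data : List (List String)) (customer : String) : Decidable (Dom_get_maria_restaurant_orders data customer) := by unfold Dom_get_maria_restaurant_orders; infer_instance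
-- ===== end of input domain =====

-- B replaces A's count-dict-then-max by successive extraction: repeatedly remove all copies of
-- the first remaining dish and compare its multiplicity against a running best (tie keeps the
-- earlier dish, matching A's insertion-order max); alternative algorithm, not claimed faster.

-- ===== PORT A =====
-- The loop builds the count dict; Python's max(dict, key=dict.get) takes the FIRST key (insertion
-- order) with maximal count = PySem.List.max? over the keys. Every key is present, so the Python
-- key function most_ordered.get equals getD _ 0 on the keys. row[0]/row[1] are ported with
-- pyGetD (exact under Pre_, which guarantees the indices are in range); the final .getD "" covers
-- the empty dict, on which Python raises ValueError (excluded by Pre_).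
def get_maria_restaurant_orders (data : List (List String)) (customer : String) : String :=
  let most_ordered : PySem.Dict String Int := data.foldl (fun d row =>
    if PySem.List.pyGetD row 0 "" = customer then
      if d.contains (PySem.List.pyGetD row 1 "") = false then
        d.insert (PySem.List.pyGetD row 1 "") 1
      else
        d.insert (PySem.List.pyGetD row 1 "") (d.getD (PySem.List.pyGetD row 1 "") 0 + 1)
    else d) PySem.Dict.empty
  (PySem.List.max? most_ordered.keys (fun k => most_ordered.getD k 0)).getD ""

-- ===== PORT B =====
-- the while loop: dish = dishes[0]; rest = [x for x in dishes if x != dish];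
-- count = len(dishes) - len(rest); keep (dish, count) if count > best_count; dishes = rest.
def pvBestLoop : List String → String → Int → String
  | [], best_dish, _ => best_dish
  | dish :: tl, best_dish, best_count =>
    let rest := (dish :: tl).filter (fun x => decide (x ≠ dish))
    let c : Int := ((dish :: tl).length : Int) - (rest.length : Int)
    if c > best_count then pvBestLoop rest dish c else pvBestLoop rest best_dish best_count
  termination_by l _ _ => l.length
  decreasing_by
    all_goals
      simp only [List.filter_cons, ne_eq, not_true_eq_false, decide_false, List.length_cons]
      exact Nat.lt_succ_of_le (List.length_filter_le _ _)

-- dishes = [row[1] for row in data if row[0] == customer]; best_dish = dishes[0] (pyGetD: exact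
-- under Pre_, which makes dishes nonempty — Python raises IndexError on the empty case).
def get_maria_restaurant_orders_alt (data : List (List String)) (customer : String) : String :=
  let dishes := (data.filter (fun row => decide (PySem.List.pyGetD row 0 "" = customer))).map
      (fun row => PySem.List.pyGetD row 1 "")
  pvBestLoop dishes (PySem.List.pyGetD dishes 0 "") 0

-- ===== PRECONDITION & SPEC =====
-- Pre_ excludes exactly the inputs where Python A raises: an empty row (row[0] → IndexError),
-- a matching row of length 1 (row[1] → IndexError), and no matching row (max of empty → ValueError).
def Pre_get_maria_restaurant_orders (data : List (List String)) (customer : String) : Prop :=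
  (∀ row ∈ data, row ≠ []) ∧
  (∀ row ∈ data, PySem.List.pyGetD row 0 "" = customer → 2 ≤ row.length) ∧
  (∃ row ∈ data, PySem.List.pyGetD row 0 "" = customer)
instance (data : List (List String)) (customer : String) : Decidable (Pre_get_maria_restaurant_orders data customer) := by unfold Pre_get_maria_restaurant_orders; infer_instance

def pvWitness_get_maria_restaurant_orders : List (List String) × String :=
  ([["maria", "coxinha"], ["jose", "pizza"], ["maria", "coxinha"], ["maria", "pizza"]], "maria")

def Spec_get_maria_restaurant_orders (data : List (List String)) (customer : String) (out : String) : Prop := out = get_maria_restaurant_orders_alt data customer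
instance (data : List (List String)) (customer : String) (out : String) : Decidable (Spec_get_maria_restaurant_orders data customer out) := by unfold Spec_get_maria_restaurant_orders; infer_instance

-- ===== CLAIM =====
def Claim_equal_get_maria_restaurant_orders : Prop := ∀ (data : List (List String)) (customer : String), Dom_get_maria_restaurant_orders data customer → Pre_get_maria_restaurant_orders data customer → Spec_get_maria_restaurant_orders data customer (get_maria_restaurant_orders data customer)

-- ===== LEMMAS AND PROOFS =====

-- A's counting loop over the rows builds exactly Counter(dishes) for the flat dish list.
theorem dict_eq_counter (data : List (List String)) (customer : String) :
    data.foldl (fun d row =>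
      if PySem.List.pyGetD row 0 "" = customer then
        if d.contains (PySem.List.pyGetD row 1 "") = false then
          d.insert (PySem.List.pyGetD row 1 "") 1
        else
          d.insert (PySem.List.pyGetD row 1 "") (d.getD (PySem.List.pyGetD row 1 "") 0 + 1)
      else d) PySem.Dict.empty
    = PySem.Dict.counter ((data.filter (fun row => decide (PySem.List.pyGetD row 0 "" = customer))).map
        (fun row => PySem.List.pyGetD row 1 "")) := by
  rw [← PySem.Dict.foldl_insert_getD_add_one_eq_counter, List.foldl_map,
    ← PySem.List.foldl_ite_eq_foldl_filter]
  apply PySem.List.foldl_congr_mem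
  intro d row _
  by_cases h : PySem.List.pyGetD row 0 "" = customer
  · rw [if_pos h, if_pos h]
    by_cases hc : d.contains (PySem.List.pyGetD row 1 "") = false
    · rw [if_pos hc, PySem.Dict.getD_of_not_contains d 0 hc, zero_add]
    · rw [if_neg hc]
  · rw [if_neg h, if_neg h]

-- the running-best fold over (dish, count) pairs that both programs reduce to
def pairMax (l : List (String × Int)) (p : String × Int) : String × Int :=
  l.foldl (fun m x => if m.2 < x.2 then x else m) p

-- adding an element already present leaves the foldl-add set unchanged elementwise
theorem foldl_add_filter_ne (tl : List String) :
    ∀ (s : PySem.Set String) (d : String), d ∈ s →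
      tl.foldl PySem.Set.add s = (tl.filter (fun x => decide (x ≠ d))).foldl PySem.Set.add s := by
  induction tl with
  | nil => intro s d _; rfl
  | cons x tl ih =>
    intro s d hd
    by_cases hx : x = d
    · subst hx
      have hadd : PySem.Set.add s x = s := by
        simp [PySem.Set.add, PySem.Set.contains, hd]
      simp only [List.filter_cons, List.foldl_cons]
      rw [if_neg (by simp), hadd]
      exact ih s x hd
    · simp only [List.filter_cons, ne_eq, hx, not_false_eq_true, decide_true, List.foldl_cons]
      exact ih (PySem.Set.add s x) d (by simp [PySem.Set.add]; split <;> simp [hd])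

-- a head element absent from the list commutes out of the foldl-add set
theorem foldl_add_cons_head (l : List String) :
    ∀ (a : String) (s : PySem.Set String), a ∉ l →
      l.foldl PySem.Set.add (a :: s) = a :: l.foldl PySem.Set.add s := by
  induction l with
  | nil => intro a s _; rfl
  | cons x l ih =>
    intro a s ha
    have hxa : (x == a) = false := by
      simp only [beq_eq_false_iff_ne]; intro h; exact ha (h ▸ List.mem_cons_self)
    have hxa' : x ≠ a := beq_eq_false_iff_ne.mp hxa
    have : PySem.Set.add (a :: s) x = a :: PySem.Set.add s x := by
      by_cases hm : x ∈ s
      · simp [PySem.Set.add, PySem.Set.contains, hm, hxa']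
      · simp [PySem.Set.add, PySem.Set.contains, hm, hxa']
    rw [List.foldl_cons, this, List.foldl_cons,
      ih a (PySem.Set.add s x) (fun h => ha (List.mem_cons_of_mem _ h))]

-- dedup of a cons: head, then dedup of the tail with all copies of the head removed
theorem dedup_cons_filter (d : String) (tl : List String) :
    PySem.List.dedup (d :: tl)
      = d :: PySem.List.dedup (tl.filter (fun x => decide (x ≠ d))) := by
  have h1 : PySem.List.dedup (d :: tl) = tl.foldl PySem.Set.add [d] := by
    simp [PySem.List.dedup, PySem.Set.ofList_eq_foldl, PySem.Set.add, PySem.Set.contains]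
  rw [h1, foldl_add_filter_ne tl [d] d (List.mem_singleton.mpr rfl),
    show ([d] : List String) = d :: [] from rfl,
    foldl_add_cons_head _ d [] (by simp), PySem.List.dedup, PySem.Set.ofList_eq_foldl]

-- the removed copies are exactly the count of the head in the whole list
theorem count_head_eq (d : String) (tl : List String) :
    (((d :: tl).length : Int) - (((d :: tl).filter (fun x => decide (x ≠ d))).length : Int))
      = ((d :: tl).count d : Int) := by
  have hsplit : tl.length = (tl.filter (fun x => decide (x ≠ d))).length + tl.count d := by
    rw [List.count, List.length_eq_countP_add_countP (l := tl) (p := fun x => decide (x ≠ d))]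
    congr 1
    · exact List.countP_eq_length_filter
    · apply List.countP_congr
      intro x _
      by_cases hxd : x = d
      · subst hxd; simp
      · simp [hxd]
  simp only [List.filter_cons, ne_eq, not_true_eq_false, decide_false, List.length_cons,
    List.count_cons_self]
  push_cast [hsplit]
  ring

-- the while loop computes the running pair-max over the deduped dishes with their counts
theorem pvBestLoop_eq_pairMax :
    ∀ (n : Nat) (dishes : List String) (bd : String) (bc : Int), dishes.length ≤ n →
      pvBestLoop dishes bd bc
        = (pairMax ((PySem.List.dedup dishes).map (fun x => (x, (dishes.count x : Int)))) (bd, bc)).1 := by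
  intro n
  induction n with
  | zero =>
    intro dishes bd bc h
    rw [List.length_eq_zero_iff.mp (Nat.le_zero.mp h)]
    simp [pvBestLoop, pairMax, PySem.List.dedup, PySem.Set.ofList]
  | succ n ih =>
    intro dishes bd bc h
    match dishes with
    | [] => simp [pvBestLoop, pairMax, PySem.List.dedup, PySem.Set.ofList]
    | d :: tl =>
      simp only [pvBestLoop]
      have hrest : ((d :: tl).filter (fun x => decide (x ≠ d))) = tl.filter (fun x => decide (x ≠ d)) := by
        simp
      have hlen : (tl.filter (fun x => decide (x ≠ d))).length ≤ n := by
        have := List.length_filter_le (fun x => decide (x ≠ d)) tl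
        simp only [List.length_cons] at h
        omega
      have hmap : (PySem.List.dedup (tl.filter (fun x => decide (x ≠ d)))).map
            (fun x => (x, ((tl.filter (fun x => decide (x ≠ d))).count x : Int)))
          = (PySem.List.dedup (tl.filter (fun x => decide (x ≠ d)))).map
            (fun x => (x, ((d :: tl).count x : Int))) := by
        apply List.map_congr_left
        intro x hx
        have hxmem : x ∈ tl.filter (fun y => decide (y ≠ d)) :=
          (PySem.List.mem_dedup _ _).mp hx
        have hxd : x ≠ d := by
          have := List.of_mem_filter hxmem
          simpa using this
        have hcnt : (tl.filter (fun y => decide (y ≠ d))).count x = (d :: tl).count x := by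
          rw [List.count_cons_of_ne (Ne.symm hxd), List.count_filter (by simp [hxd])]
        rw [hcnt]
      rw [dedup_cons_filter, List.map_cons, count_head_eq d tl, hrest]
      unfold pairMax
      rw [List.foldl_cons, ← pairMax]
      by_cases hc : ((d :: tl).count d : Int) > bc
      · rw [if_pos hc, ih _ _ _ hlen, hmap, if_pos hc]
      · rw [if_neg hc, ih _ _ _ hlen, hmap, if_neg hc]

-- Python's max over a nonempty list is the running pair-max over (element, key) pairs
theorem max?_cons_eq_pairMax (key : String → Int) :
    ∀ (l : List String) (m : String),
      PySem.List.max? (m :: l) key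
        = some (pairMax (l.map (fun x => (x, key x))) (m, key m)).1 := by
  intro l
  induction l with
  | nil => intro m; simp [PySem.List.max?, pairMax]
  | cons x l ih =>
    intro m
    have hstep : PySem.List.max? (m :: x :: l) key
        = PySem.List.max? ((if key m < key x then x else m) :: l) key := by
      simp only [PySem.List.max?, List.foldl_cons]
      by_cases h : key m < key x
      · simp [h]
      · simp [h]
    rw [hstep, ih]
    by_cases h : key m < key x
    · simp [h, pairMax]
    · simp [h, pairMax]

-- ===== VERDICT (by name: the statement is the Claim_ definition above) =====
theorem get_maria_restaurant_orders_spec : Claim_equal_get_maria_restaurant_orders := by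
  intro data customer _ _
  unfold Spec_get_maria_restaurant_orders get_maria_restaurant_orders get_maria_restaurant_orders_alt
  rw [dict_eq_counter]
  simp only [PySem.Dict.keys_counter]
  set dishes := (data.filter (fun row => decide (PySem.List.pyGetD row 0 "" = customer))).map
      (fun row => PySem.List.pyGetD row 1 "") with hdishes
  have hkeyfun : (fun k => (PySem.Dict.counter dishes).getD k 0)
      = (fun k => (dishes.count k : Int)) := by
    funext k
    rw [PySem.Dict.getD_counter]
  rw [hkeyfun]
  match dishes with
  | [] =>
    simp [pvBestLoop, PySem.List.max?, PySem.Set.ofList, PySem.List.pyGetD, PySem.List.pyGet?,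
      PySem.List.pyIdx?]
  | d :: tl =>
    rw [← PySem.List.dedup_eq_ofList, dedup_cons_filter,
      max?_cons_eq_pairMax (fun k => (((d :: tl).count k : Int)))]
    have hd0 : PySem.List.pyGetD (d :: tl) 0 "" = d := by
      simp [PySem.List.pyGetD, PySem.List.pyGet?, PySem.List.pyIdx?]
    rw [hd0]
    simp only [pvBestLoop]
    have hc := count_head_eq d tl
    have hcpos : ((0 : Int) < ((d :: tl).count d : Int)) := by
      have : 1 ≤ (d :: tl).count d := by
        rw [List.count_cons_self]; omega
      exact_mod_cast Nat.lt_of_lt_of_le Nat.zero_lt_one this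
    rw [hc, if_pos hcpos]
    have hrest : ((d :: tl).filter (fun x => decide (x ≠ d))) = tl.filter (fun x => decide (x ≠ d)) := by
      simp
    rw [hrest, pvBestLoop_eq_pairMax (tl.filter (fun x => decide (x ≠ d))).length _ _ _ le_rfl]
    have hmap : (PySem.List.dedup (tl.filter (fun x => decide (x ≠ d)))).map
          (fun x => (x, ((tl.filter (fun x => decide (x ≠ d))).count x : Int)))
        = (PySem.List.dedup (tl.filter (fun x => decide (x ≠ d)))).map
          (fun x => (x, ((d :: tl).count x : Int))) := by
      apply List.map_congr_left
      intro x hx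
      have hxmem : x ∈ tl.filter (fun y => decide (y ≠ d)) :=
        (PySem.List.mem_dedup _ _).mp hx
      have hxd : x ≠ d := by
        have := List.of_mem_filter hxmem
        simpa using this
      rw [List.count_cons_of_ne (Ne.symm hxd), List.count_filter (by simp [hxd])]
    rw [hmap]
    simp
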